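-- pv_equiv track=rewrite | github.com/arthurtamm/Relogio-VHDL | AssemblerASM_BIN_VHDL.py | coletar_labels
-- ===== SOURCE A (Python) =====
-- def coletar_labels(lines):
--     labels = {}
--     linha_atual = 0
--     for line in lines:
--         if line.strip().endswith(':'):  # Detecta um label
--             label_name = line.strip()[:-1]  # Remove o ':' do final
--             labels[label_name] = linha_atual  # Associa o label ao número da linha atual
--         else:
--             # Apenas linhas que não são labels ou linhas vazias/comentários contam
--             if not (line.strip().startswith('#') or not line.strip()):
--                 linha_atual += 1
--     return labels
-- ===== SOURCE B (Python) =====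
-- def coletar_labels(lines):
--     # Two-pass decomposition: strip once, compute prefix instruction counts, then fill the dict.
--     stripped = [line.strip() for line in lines]
--     counts = []
--     c = 0
--     for s in stripped:
--         counts.append(c)
--         if s and not s.endswith(':') and not s.startswith('#'):
--             c += 1
--     labels = {}
--     for s, k in zip(stripped, counts):
--         if s.endswith(':'):
--             labels[s[:-1]] = k
--     return labels
-- ===== Notes on version B (the rewrite author's own statement) =====
-- stated objective: alternative
-- what changed: Replaces the single stateful loop (dict + running counter updated together) by a two-pass decomposition: one pass computes per-line prefix instruction counts, a second pass fills the dict from the label lines zipped with those counts.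
import Mathlib
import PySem

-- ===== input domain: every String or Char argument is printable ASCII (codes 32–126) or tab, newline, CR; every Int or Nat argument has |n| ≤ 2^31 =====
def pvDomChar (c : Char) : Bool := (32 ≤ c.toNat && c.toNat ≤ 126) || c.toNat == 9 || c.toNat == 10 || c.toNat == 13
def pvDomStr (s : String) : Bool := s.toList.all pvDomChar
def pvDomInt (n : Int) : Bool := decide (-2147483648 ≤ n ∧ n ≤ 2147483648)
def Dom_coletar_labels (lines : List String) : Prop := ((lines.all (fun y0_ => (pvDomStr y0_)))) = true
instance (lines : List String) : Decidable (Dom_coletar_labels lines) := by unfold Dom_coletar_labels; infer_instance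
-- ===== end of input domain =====

-- B replaces A's single stateful loop with a two-pass decomposition (prefix counts, then dict fill); alternative, same cost.


-- ===== PORT A =====
def clA_step (st : PySem.Dict String Int × Int) (line : String) : PySem.Dict String Int × Int :=
  let s := PySem.Str.strip line
  if PySem.Str.endswith s ":" then
    (st.1.insert (PySem.Str.slice s none (some (-1))) st.2, st.2)
  else
    if !(PySem.Str.startswith s "#" || s == "") then (st.1, st.2 + 1) else st

def coletar_labels (lines : List String) : List (String × Int) :=
  (lines.foldl clA_step (PySem.Dict.empty, 0)).1.items

-- ===== PORT B =====
def clB_isInstr (s : String) : Bool :=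
  s != "" && !PySem.Str.endswith s ":" && !PySem.Str.startswith s "#"

def clB_counts (c : Int) : List String → List Int
  | [] => []
  | s :: rest => c :: clB_counts (if clB_isInstr s then c + 1 else c) rest

def clB_fill (d : PySem.Dict String Int) : List (String × Int) → PySem.Dict String Int
  | [] => d
  | (s, k) :: rest =>
      clB_fill (if PySem.Str.endswith s ":" then d.insert (PySem.Str.slice s none (some (-1))) k else d) rest

def coletar_labels_alt (lines : List String) : List (String × Int) :=
  let stripped := lines.map PySem.Str.strip
  (clB_fill PySem.Dict.empty (stripped.zip (clB_counts 0 stripped))).items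

-- ===== PRECONDITION & SPEC =====
def Spec_coletar_labels (lines : List String) (out : List (String × Int)) : Prop := out = coletar_labels_alt lines
instance (lines : List String) (out : List (String × Int)) : Decidable (Spec_coletar_labels lines out) := by unfold Spec_coletar_labels; infer_instance

-- ===== CLAIM (what is proved, stated in full; the proofs are below) =====
def Claim_equal_coletar_labels : Prop := ∀ (lines : List String), Dom_coletar_labels lines → Spec_coletar_labels lines (coletar_labels lines)

-- ===== LEMMAS AND PROOFS =====
theorem cl_main (lines : List String) (d : PySem.Dict String Int) (c : Int) :
    (lines.foldl clA_step (d, c)).1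
      = clB_fill d ((lines.map PySem.Str.strip).zip (clB_counts c (lines.map PySem.Str.strip))) := by
  induction lines generalizing d c with
  | nil => simp [clB_fill]
  | cons line rest ih =>
      simp only [List.foldl_cons, List.map_cons, clB_counts, List.zip_cons_cons, clB_fill,
        clA_step, clB_isInstr]
      by_cases he : PySem.Chars.endswith (PySem.Chars.strip line.toList) [':'] = true
      · simp [he, ih]
      · by_cases hn : PySem.Str.strip line = ""
        · simp [hn, ih, PySem.Chars.endswith]
        · by_cases hs : PySem.Chars.startswith (PySem.Chars.strip line.toList) ['#'] = true
          · simp [he, hs, ih]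
          · simp [he, hn, hs, ih]

-- ===== VERDICT (by name: the statement is the Claim_ definition above) =====
theorem coletar_labels_spec : Claim_equal_coletar_labels := by
  intro lines _
  unfold Spec_coletar_labels coletar_labels coletar_labels_alt
  rw [cl_main]
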